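-- pv_equiv track=rewrite | github.com/alumnos-ingcom/TP5-GastonPrat | tp5ej05_V2.py | inversion_mayusculas
-- ===== SOURCE A (Python) =====
-- def inversion_mayusculas(texto):
--     texto_modificado = ""
--     for c in texto:
--         if ord(c) == 32:
--             texto_modificado += " "
--         elif ord(c) >= ord("A") and ord(c) <= ord("Z"):
--             temp = ord(c)
--             temp = temp + 32
--             temp = chr(temp)
--             texto_modificado += temp
--         elif ord(c) >= ord("a") and ord(c) <= ord("z"):
--             temp = ord(c)
--             temp = temp - 32
--             temp = chr(temp)
--             texto_modificado += temp
--         else: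
--             texto_modificado += c
--     return texto_modificado
-- ===== SOURCE B (Python) =====
-- # B: precomputed maketrans translation table over the 52 ASCII letters; translate does one table lookup per character.
-- _TABLE = str.maketrans(
--     "ABCDEFGHIJKLMNOPQRSTUVWXYZabcdefghijklmnopqrstuvwxyz",
--     "abcdefghijklmnopqrstuvwxyzABCDEFGHIJKLMNOPQRSTUVWXYZ",
-- )
--
-- def inversion_mayusculas(texto):
--     return texto.translate(_TABLE)
-- ===== Notes on version B (the rewrite author's own statement) =====
-- stated objective: idiomatic
-- what changed: Replaced the per-character if/elif comparison ladder and string concatenation with a precomputed 52-entry translation table (str.maketrans) applied in one texto.translate call.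
import Mathlib
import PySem

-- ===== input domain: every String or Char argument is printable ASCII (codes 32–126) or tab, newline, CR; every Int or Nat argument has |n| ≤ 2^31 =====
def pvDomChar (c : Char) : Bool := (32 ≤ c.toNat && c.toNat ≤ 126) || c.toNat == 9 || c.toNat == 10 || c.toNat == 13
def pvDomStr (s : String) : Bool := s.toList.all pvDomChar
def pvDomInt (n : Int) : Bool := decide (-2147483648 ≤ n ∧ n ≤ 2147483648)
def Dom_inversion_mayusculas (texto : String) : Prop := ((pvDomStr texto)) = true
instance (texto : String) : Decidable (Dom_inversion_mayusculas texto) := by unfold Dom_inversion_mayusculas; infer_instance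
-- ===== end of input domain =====

-- B replaces A's per-character if/elif ladder with a precomputed 52-letter translation table lookup (idiomatic).


-- ===== PORT A =====
def inversion_mayusculas (texto : String) : String :=
  texto.toList.foldl (fun acc c =>
    if c.toNat = 32 then acc ++ " "
    else if 65 ≤ c.toNat ∧ c.toNat ≤ 90 then acc ++ String.ofList [Char.ofNat (c.toNat + 32)]
    else if 97 ≤ c.toNat ∧ c.toNat ≤ 122 then acc ++ String.ofList [Char.ofNat (c.toNat - 32)]
    else acc ++ String.ofList [c]) ""


-- ===== PORT B =====
-- the maketrans table: dict from each of the 52 ASCII letters to its case-flipped counterpart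
def pvTable : PySem.Dict Char Char :=
  ("ABCDEFGHIJKLMNOPQRSTUVWXYZabcdefghijklmnopqrstuvwxyz".toList.zip
   "abcdefghijklmnopqrstuvwxyzABCDEFGHIJKLMNOPQRSTUVWXYZ".toList).foldl
    (fun d kv => d.insert kv.1 kv.2) PySem.Dict.empty

-- texto.translate(table): each character is looked up in the table, absent characters pass through
def inversion_mayusculas_alt (texto : String) : String :=
  String.ofList (texto.toList.map (fun c => pvTable.getD c c))


-- ===== PRECONDITION & SPEC =====
def Spec_inversion_mayusculas (texto : String) (out : String) : Prop := out = inversion_mayusculas_alt texto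
instance (texto : String) (out : String) : Decidable (Spec_inversion_mayusculas texto out) := by unfold Spec_inversion_mayusculas; infer_instance

-- ===== CLAIM (what is proved, stated in full; the proofs are below) =====
def Claim_equal_inversion_mayusculas : Prop := ∀ (texto : String), Dom_inversion_mayusculas texto → Spec_inversion_mayusculas texto (inversion_mayusculas texto)

-- ===== LEMMAS AND PROOFS =====
set_option maxRecDepth 4000 in
-- per-character agreement: on domain characters A's branch ladder returns exactly the table lookup
theorem pvFlip_eq (c : Char) (h : pvDomChar c = true) :
    (if c.toNat = 32 then ' '
     else if 65 ≤ c.toNat ∧ c.toNat ≤ 90 then Char.ofNat (c.toNat + 32)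
     else if 97 ≤ c.toNat ∧ c.toNat ≤ 122 then Char.ofNat (c.toNat - 32)
     else c) = pvTable.getD c c := by
  have hlt : c.toNat < 127 := by
    simp [pvDomChar] at h
    omega
  have key : ∀ n : Fin 127,
      (if (Char.ofNat n.val).toNat = 32 then ' '
       else if 65 ≤ (Char.ofNat n.val).toNat ∧ (Char.ofNat n.val).toNat ≤ 90 then Char.ofNat ((Char.ofNat n.val).toNat + 32)
       else if 97 ≤ (Char.ofNat n.val).toNat ∧ (Char.ofNat n.val).toNat ≤ 122 then Char.ofNat ((Char.ofNat n.val).toNat - 32)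
       else (Char.ofNat n.val)) = pvTable.getD (Char.ofNat n.val) (Char.ofNat n.val) := by decide
  have hc : Char.ofNat c.toNat = c := Char.ofNat_toNat c
  have := key ⟨c.toNat, hlt⟩
  simpa [hc] using this

theorem pvFoldA (l : List Char) (h : l.all pvDomChar = true) (acc : String) :
    l.foldl (fun acc c =>
      if c.toNat = 32 then acc ++ " "
      else if 65 ≤ c.toNat ∧ c.toNat ≤ 90 then acc ++ String.ofList [Char.ofNat (c.toNat + 32)]
      else if 97 ≤ c.toNat ∧ c.toNat ≤ 122 then acc ++ String.ofList [Char.ofNat (c.toNat - 32)]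
      else acc ++ String.ofList [c]) acc = acc ++ String.ofList (l.map (fun c => pvTable.getD c c)) := by
  induction l generalizing acc with
  | nil => simp
  | cons c cs ih =>
    simp only [List.all_cons, Bool.and_eq_true] at h
    have hstep : (if c.toNat = 32 then acc ++ " "
      else if 65 ≤ c.toNat ∧ c.toNat ≤ 90 then acc ++ String.ofList [Char.ofNat (c.toNat + 32)]
      else if 97 ≤ c.toNat ∧ c.toNat ≤ 122 then acc ++ String.ofList [Char.ofNat (c.toNat - 32)]
      else acc ++ String.ofList [c]) = acc ++ String.ofList [pvTable.getD c c] := by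
      have hsp : (" " : String) = String.ofList [' '] := by decide
      rw [← pvFlip_eq c h.1]
      simp only [hsp]
      split_ifs with h1 h2 h3 <;> rfl
    simp only [List.foldl_cons, hstep, List.map_cons]
    rw [ih h.2, String.append_assoc, ← String.ofList_append]
    simp


-- ===== VERDICT (by name: the statement is the Claim_ definition above) =====
theorem inversion_mayusculas_spec : Claim_equal_inversion_mayusculas := by
  intro texto h
  unfold Spec_inversion_mayusculas inversion_mayusculas inversion_mayusculas_alt
  have := pvFoldA texto.toList h ""
  simpa using this
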